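-- pv_equiv track=rewrite | github.com/mbgeorge48/messenger_interactionator | src/rg_activity_monitor.py | get_longest_message
-- ===== SOURCE A (Python) =====
-- def get_longest_message(messages):
--     longest_message_length = 0
--     longest_message = {}
--     for message in messages:
--         if (
--             message.get("content")
--             and len(message.get("content")) > longest_message_length
--         ):
--             longest_message_length = len(message.get("content"))
--             longest_message = message
--     return longest_message
-- ===== SOURCE B (Python) =====
-- def get_longest_message(messages):
--     candidates = [m for m in messages if m.get("content")]
--     if not candidates:
--         return {}
--     return sorted(candidates, key=lambda m: len(m["content"]), reverse=True)[0]
-- ===== Notes on version B (the rewrite author's own statement) =====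
-- stated objective: alternative
-- what changed: Replaces the running-max scan with a filter of truthy-content messages followed by a stable reverse sort on content length, returning the sorted list's head (stability preserves A's first-occurrence tie-breaking).
import Mathlib
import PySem

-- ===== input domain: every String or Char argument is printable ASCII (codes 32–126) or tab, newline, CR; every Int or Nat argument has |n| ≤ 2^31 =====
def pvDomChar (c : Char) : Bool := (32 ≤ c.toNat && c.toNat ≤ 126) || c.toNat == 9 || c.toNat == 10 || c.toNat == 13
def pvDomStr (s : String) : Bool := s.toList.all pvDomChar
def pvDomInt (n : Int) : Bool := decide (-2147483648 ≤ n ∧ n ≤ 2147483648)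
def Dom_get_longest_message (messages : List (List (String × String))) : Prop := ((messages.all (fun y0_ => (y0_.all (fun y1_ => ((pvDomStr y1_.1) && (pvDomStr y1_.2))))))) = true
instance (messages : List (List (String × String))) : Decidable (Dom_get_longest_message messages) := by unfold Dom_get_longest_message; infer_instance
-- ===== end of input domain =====

-- ===== PORT A =====
-- B replaces A's running-max scan by filter + stable reverse sort + head; same return value, no speed claim.
def aStep (st : Int × List (String × String)) (m : List (String × String)) :
    Int × List (String × String) :=
  match PySem.Dict.get? ⟨m⟩ "content" with
  | none => st
  | some c => if c ≠ "" ∧ st.1 < PySem.Str.len c then (PySem.Str.len c, m) else st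

def get_longest_message (messages : List (List (String × String))) : List (String × String) :=
  (messages.foldl aStep ((0 : Int), ([] : List (String × String)))).2

-- ===== PORT B =====
def truthyContent (m : List (String × String)) : Bool :=
  match PySem.Dict.get? ⟨m⟩ "content" with
  | some c => c != ""
  | none => false

def contentLen (m : List (String × String)) : Int :=
  PySem.Str.len (PySem.Dict.getD ⟨m⟩ "content" "")

def get_longest_message_alt (messages : List (List (String × String))) : List (String × String) :=
  match PySem.List.sorted (messages.filter truthyContent) contentLen true with
  | [] => []
  | m :: _ => m

-- ===== PRECONDITION & SPEC =====
def Spec_get_longest_message (messages : List (List (String × String))) (out : List (String × String)) : Prop := out = get_longest_message_alt messages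
instance (messages : List (List (String × String))) (out : List (String × String)) : Decidable (Spec_get_longest_message messages out) := by unfold Spec_get_longest_message; infer_instance

-- ===== CLAIM (what is proved, stated in full; the proofs are below) =====
def Claim_equal_get_longest_message : Prop := ∀ (messages : List (List (String × String))), Dom_get_longest_message messages → Spec_get_longest_message messages (get_longest_message messages)

-- ===== LEMMAS AND PROOFS =====

-- the first message attaining the maximal content length, starting from candidate a
def pvScan (a : List (String × String)) : List (List (String × String)) → List (String × String)
  | [] => a
  | m :: t => if contentLen a < contentLen m then pvScan m t else pvScan a t

-- the pure max step A performs on truthy messages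
def fStep (st : Int × List (String × String)) (m : List (String × String)) :
    Int × List (String × String) :=
  if st.1 < contentLen m then (contentLen m, m) else st

theorem aStep_eq (st : Int × List (String × String)) (m : List (String × String)) :
    aStep st m = if truthyContent m then fStep st m else st := by
  unfold aStep truthyContent fStep contentLen
  cases h : PySem.Dict.get? ⟨m⟩ "content" with
  | none => simp
  | some c =>
    by_cases hc : c = ""
    · subst hc; simp
    · simp [PySem.Dict.getD, h, hc]

theorem truthy_pos (m : List (String × String)) (h : truthyContent m = true) :
    0 < contentLen m := by
  unfold truthyContent at h
  unfold contentLen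
  cases hg : PySem.Dict.get? ⟨m⟩ "content" with
  | none => rw [hg] at h; simp at h
  | some c =>
    rw [hg] at h
    simp at h
    have hne : c.toList ≠ [] := by simpa using h
    have hpos : 0 < c.toList.length := List.length_pos_iff.mpr hne
    simp [PySem.Dict.getD, hg, PySem.Str.len]
    exact_mod_cast hpos

theorem fold_fStep (t : List (List (String × String))) :
    ∀ a, t.foldl fStep (contentLen a, a) = (contentLen (pvScan a t), pvScan a t) := by
  induction t with
  | nil => intro a; simp [pvScan]
  | cons m t ih =>
    intro a
    simp only [List.foldl_cons, pvScan, fStep]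
    by_cases h : contentLen a < contentLen m
    · simp [h, ih m]
    · simp [h, ih a]

theorem fold_insertBy (L : List (List (String × String))) :
    ∀ h t, ∃ t',
      L.foldl (fun acc x =>
          PySem.List.insertBy (fun a b => decide (contentLen b < contentLen a)) x acc)
        (h :: t) = pvScan h L :: t' := by
  induction L with
  | nil => intro h t; exact ⟨t, rfl⟩
  | cons m L ih =>
    intro h t
    simp only [List.foldl_cons, PySem.List.insertBy, pvScan]
    by_cases hk : contentLen h < contentLen m
    · simpa [hk] using ih m (h :: t)
    · simpa [hk] using ih h (PySem.List.insertBy (fun a b => decide (contentLen b < contentLen a)) m t)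

-- ===== VERDICT (by name: the statement is the Claim_ definition above) =====
theorem get_longest_message_spec : Claim_equal_get_longest_message := by
  intro messages _
  unfold Spec_get_longest_message get_longest_message get_longest_message_alt
  have hfold : messages.foldl aStep ((0 : Int), ([] : List (String × String)))
      = (messages.filter truthyContent).foldl fStep ((0 : Int), ([] : List (String × String))) := by
    rw [← PySem.List.foldl_if_eq_foldl_filter truthyContent fStep]
    exact PySem.List.foldl_congr_mem messages _ _ _ (fun acc x _ => aStep_eq acc x)
  rw [hfold, PySem.List.sorted_rev_eq_foldl_insertBy]
  cases hL : messages.filter truthyContent with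
  | nil => rfl
  | cons m t =>
    have hm : truthyContent m = true := by
      have : m ∈ messages.filter truthyContent := by rw [hL]; exact List.mem_cons_self ..
      exact (List.mem_filter.mp this).2
    have h0 : fStep ((0 : Int), ([] : List (String × String))) m = (contentLen m, m) := by
      unfold fStep; simp [truthy_pos m hm]
    simp only [List.foldl_cons, h0, fold_fStep t m]
    obtain ⟨t', ht'⟩ := fold_insertBy t m []
    have : PySem.List.insertBy (fun a b => decide (contentLen b < contentLen a)) m
        ([] : List (List (String × String))) = [m] := rfl
    rw [this, ht']
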